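-- pv_equiv track=rewrite | github.com/Mikecraft1224/EiP-WiSe2024 | Blatt 05/HeavyMetalUmlaute_1.py | translateToHeavyMetalTogether
-- ===== SOURCE A (Python) =====
-- def translateToHeavyMetalTogether(s: str):
--     counter = 0
--     translated = False
--
--     out = ""
--
--     translation = {
--         "a": "ä",
--         "o": "ö",
--         "u": "ü",
--     }
--
--     for c in s:
--         # if there has been a space and the current character is in the translation
--         if not translated and c.lower() in translation:
--             counter += 1
--
--             # if there has been two characters in this word
--             if counter == 2:
--                 # add the tranlated character to the output in the correct case
--                 out += translation[c.lower()] if c.islower() \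
--                     else translation[c.lower()].upper()
--                 translated = True
--             else:
--                 out += c
--         else:
--             # reset the counter if there is a space
--             if c == " ":
--                 translated = False
--                 counter = 0
--
--             out += c
--
--     return out
-- ===== SOURCE B (Python) =====
-- def translateToHeavyMetalTogether(s: str):
--     # Process each space-separated word independently: locate the second
--     # a/o/u vowel (case-insensitive) and splice in its umlaut via slicing.
--     umlaut = {"a": "\u00e4", "o": "\u00f6", "u": "\u00fc"}
--     words = s.split(" ")
--     out = []
--     for w in words:
--         fixed = w
--         count = 0
--         for i, c in enumerate(w):
--             lc = c.lower()
--             if lc in ("a", "o", "u"):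
--                 count += 1
--                 if count == 2:
--                     u = umlaut[lc]
--                     fixed = w[:i] + (u if c.islower() else u.upper()) + w[i + 1:]
--                     break
--         out.append(fixed)
--     return " ".join(out)
-- ===== Notes on version B (the rewrite author's own statement) =====
-- stated objective: alternative
-- what changed: A's single stateful scan with a running counter and a translated flag reset on spaces is replaced by split-on-space, independent per-word fixing (locate the second a/o/u vowel and splice its umlaut in by slicing), and rejoin.
import Mathlib
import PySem

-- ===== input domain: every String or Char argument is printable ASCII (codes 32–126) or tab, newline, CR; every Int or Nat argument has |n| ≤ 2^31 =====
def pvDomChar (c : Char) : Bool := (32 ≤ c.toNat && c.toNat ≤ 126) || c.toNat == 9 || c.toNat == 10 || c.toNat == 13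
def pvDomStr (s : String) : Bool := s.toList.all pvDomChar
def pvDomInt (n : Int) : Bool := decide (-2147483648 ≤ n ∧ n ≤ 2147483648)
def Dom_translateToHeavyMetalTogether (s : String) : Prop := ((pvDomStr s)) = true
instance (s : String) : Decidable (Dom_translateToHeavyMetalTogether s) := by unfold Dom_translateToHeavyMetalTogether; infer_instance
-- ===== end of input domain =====

-- B re-decomposes A's single stateful scan (running counter + translated flag, reset on
-- spaces) into: split on ' ', fix each word independently by slice-splicing its second
-- a/o/u vowel, rejoin — an alternative decomposition of the same cost.

-- ===== PORT A =====
-- A's dict of 1-char strings {"a":"ä","o":"ö","u":"ü"}, ported on the char level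
def pvTransA : PySem.Dict Char Char :=
  ((PySem.Dict.empty.insert 'a' 'ä').insert 'o' 'ö').insert 'u' 'ü'

-- hand port of str.upper() applied to a looked-up value ("ä"/"ö"/"ü"): exact for these three strings
def pvUmlUpperA (c : Char) : Char :=
  if c = 'ä' then 'Ä' else if c = 'ö' then 'Ö' else if c = 'ü' then 'Ü' else c

-- one iteration of A's for-loop; state = (counter, translated, out)
def pvStepA (st : Int × Bool × List Char) (c : Char) : Int × Bool × List Char :=
  if !st.2.1 && pvTransA.contains (PySem.Chars.lowerChar c) then
    if st.1 + 1 = 2 then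
      let t := (pvTransA.get? (PySem.Chars.lowerChar c)).getD c
      (st.1 + 1, true, st.2.2 ++ [if PySem.Chars.islower c then t else pvUmlUpperA t])
    else (st.1 + 1, st.2.1, st.2.2 ++ [c])
  else
    if c = ' ' then (0, false, st.2.2 ++ [c])
    else (st.1, st.2.1, st.2.2 ++ [c])

def translateToHeavyMetalTogether (s : String) : String :=
  String.ofList (s.toList.foldl pvStepA (0, false, [])).2.2

-- ===== PORT B =====
-- Source B's dict {"a":"ä","o":"ö","u":"ü"} indexed only at its three keys, as a char function
def pvUmlB (c : Char) : Char := if c = 'a' then 'ä' else if c = 'o' then 'ö' else 'ü'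

-- hand port of u.upper() where u is "ä"/"ö"/"ü": exact for these three strings
def pvUmlUpperB (c : Char) : Char := if c = 'ä' then 'Ä' else if c = 'ö' then 'Ö' else 'Ü'

-- Source B's inner `for i, c in enumerate(w)` with early break; w[:i] / w[i+1:] via PySem.List.slice
def pvFixGoB (w : List Char) (count : Int) : List (Int × Char) → List Char
  | [] => w
  | (i, c) :: rest =>
    let lc := PySem.Chars.lowerChar c
    if lc = 'a' || lc = 'o' || lc = 'u' then
      if count + 1 = 2 then
        PySem.List.slice w none (some i)
          ++ [if PySem.Chars.islower c then pvUmlB lc else pvUmlUpperB (pvUmlB lc)]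
          ++ PySem.List.slice w (some (i + 1)) none
      else pvFixGoB w (count + 1) rest
    else pvFixGoB w count rest

def pvFixB (w : List Char) : List Char := pvFixGoB w 0 (PySem.List.enumerate w 0)

def translateToHeavyMetalTogether_alt (s : String) : String :=
  String.ofList (List.intercalate [' '] ((List.splitOn ' ' s.toList).map pvFixB))

-- ===== PRECONDITION & SPEC =====
def Spec_translateToHeavyMetalTogether (s : String) (out : String) : Prop := out = translateToHeavyMetalTogether_alt s
instance (s : String) (out : String) : Decidable (Spec_translateToHeavyMetalTogether s out) := by unfold Spec_translateToHeavyMetalTogether; infer_instance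

-- ===== CLAIM (what is proved, stated in full; the proofs are below) =====
def Claim_equal_translateToHeavyMetalTogether : Prop := ∀ (s : String), Dom_translateToHeavyMetalTogether s → Spec_translateToHeavyMetalTogether s (translateToHeavyMetalTogether s)

-- ===== LEMMAS AND PROOFS =====

/-- is c (case-insensitively) one of a/o/u: the condition both programs branch on -/
def pvVK (c : Char) : Bool :=
  PySem.Chars.lowerChar c = 'a' || PySem.Chars.lowerChar c = 'o' || PySem.Chars.lowerChar c = 'u'

/-- the umlaut replacement character, in c's own case -/
def pvU (c : Char) : Char :=
  if PySem.Chars.islower c then pvUmlB (PySem.Chars.lowerChar c)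
  else pvUmlUpperB (pvUmlB (PySem.Chars.lowerChar c))

/-- recursive reformulation of A's loop; (k, t) = (counter, translated) -/
def pvRA (k : Int) (t : Bool) : List Char → List Char
  | [] => []
  | c :: cs =>
    if !t && pvVK c then
      if k + 1 = 2 then pvU c :: pvRA (k + 1) true cs
      else c :: pvRA (k + 1) t cs
    else if c = ' ' then c :: pvRA 0 false cs
    else c :: pvRA k t cs

/-- per-word fixer with running count: recursive form of B's inner loop -/
def pvWfix (k : Int) : List Char → List Char
  | [] => []
  | c :: cs =>
    if pvVK c then
      if k + 1 = 2 then pvU c :: cs else c :: pvWfix (k + 1) cs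
    else c :: pvWfix k cs

theorem pvContainsA_eq (c : Char) :
    pvTransA.contains (PySem.Chars.lowerChar c) = pvVK c := by
  simp [pvTransA, PySem.Dict.contains, PySem.Dict.insert, PySem.Dict.empty, pvVK, List.any,
    eq_comm, Bool.beq_eq_decide_eq, Bool.or_assoc]

theorem pvEmitA_eq (c : Char) (h : pvVK c = true) :
    (if PySem.Chars.islower c then (pvTransA.get? (PySem.Chars.lowerChar c)).getD c
     else pvUmlUpperA ((pvTransA.get? (PySem.Chars.lowerChar c)).getD c)) = pvU c := by
  simp only [pvVK, Bool.or_eq_true, decide_eq_true_eq] at h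
  unfold pvU
  refine h.elim (fun h' => h'.elim (fun h => ?_) (fun h => ?_)) (fun h => ?_)
  · rw [h, show pvTransA.get? 'a' = some 'ä' from by decide]; rfl
  · rw [h, show pvTransA.get? 'o' = some 'ö' from by decide]; rfl
  · rw [h, show pvTransA.get? 'u' = some 'ü' from by decide]; rfl

/-- A's foldl, started from any state, appends `pvRA` of the remaining input -/
theorem pvFoldA (cs : List Char) : ∀ (k : Int) (t : Bool) (out : List Char),
    (cs.foldl pvStepA (k, t, out)).2.2 = out ++ pvRA k t cs := by
  induction cs with
  | nil => intro k t out; simp [pvRA]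
  | cons c cs ih =>
    intro k t out
    simp only [List.foldl_cons]
    by_cases hv : (!t && pvVK c) = true
    · by_cases h2 : k + 1 = 2
      · have hvk : pvVK c = true := by revert hv; cases pvVK c <;> simp
        simp [pvStepA, pvContainsA_eq, hv, h2, pvRA, ih, pvEmitA_eq c hvk]
      · simp [pvStepA, pvContainsA_eq, hv, h2, pvRA, ih]
    · by_cases hs : c = ' '
      · simp [pvStepA, pvContainsA_eq, hs, pvRA, ih, show pvVK ' ' = false from by decide]
      · simp [pvStepA, pvContainsA_eq, hv, hs, pvRA, ih]

/-- B's enumerate-with-break loop is the recursive per-word fixer -/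
theorem pvFixGoB_spec (suf : List Char) : ∀ (pre : List Char) (k : Int),
    pvFixGoB (pre ++ suf) k (PySem.List.enumerate suf (pre.length : Int)) = pre ++ pvWfix k suf := by
  induction suf with
  | nil => intro pre k; simp [pvFixGoB, pvWfix, PySem.List.enumerate]
  | cons c cs ih =>
    intro pre k
    rw [PySem.List.enumerate_cons]
    show pvFixGoB (pre ++ c :: cs) k (((pre.length : Int), c) :: PySem.List.enumerate cs ((pre.length : Int) + 1)) = _
    by_cases hv : pvVK c = true
    · by_cases h2 : k + 1 = 2
      · have h1 : (0:Int) ≤ (pre.length : Int) := by positivity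
        rw [pvFixGoB]
        simp only [pvVK] at hv
        rw [if_pos hv, if_pos h2]
        rw [PySem.List.slice_to _ h1, PySem.List.slice_from _ (by positivity)]
        have ht : ((pre.length : Int)).toNat = pre.length := Int.toNat_natCast _
        have ht2 : ((pre.length : Int) + 1).toNat = pre.length + 1 := by
          rw [show ((pre.length:Int)+1) = ((pre.length+1 : Nat) : Int) by push_cast; ring, Int.toNat_natCast]
        rw [ht, ht2]
        rw [List.take_left' (l₂ := c :: cs) (by simp)]
        rw [show pre ++ c :: cs = (pre ++ [c]) ++ cs by simp,
          List.drop_left' (l₂ := cs) (by simp)]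
        simp [pvWfix, hv, h2, pvU, pvVK]
      · rw [pvFixGoB]
        simp only [pvVK] at hv
        rw [if_pos hv, if_neg h2]
        have : ((pre.length : Int) + 1) = (((pre ++ [c]).length : Nat) : Int) := by simp
        rw [this, show pre ++ c :: cs = (pre ++ [c]) ++ cs by simp, ih]
        simp [pvWfix, hv, h2, pvVK]
    · rw [pvFixGoB]
      simp only [pvVK] at hv
      rw [if_neg hv]
      have : ((pre.length : Int) + 1) = (((pre ++ [c]).length : Nat) : Int) := by simp
      rw [this, show pre ++ c :: cs = (pre ++ [c]) ++ cs by simp, ih]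
      simp [pvWfix, hv, pvVK]

theorem pvIntercalate_cons_cons (sep w : List Char) (l : List (List Char)) (c : Char) :
    List.intercalate sep ((c :: w) :: l) = c :: List.intercalate sep (w :: l) := by
  cases l with
  | nil => simp [List.intercalate]
  | cons y ys => simp [List.intercalate, List.intersperse]

theorem pvSplitOn_eq (cs : List Char) : List.splitOn ' ' cs = List.splitOnP (· == ' ') cs := rfl

/-- main invariant: A's loop from (k, false) is B's split/fix/join with the first word's
count started at k; from (k, true) it leaves the first word untouched -/
theorem pvMain (cs : List Char) :
    (∀ k : Int, pvRA k false cs =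
      List.intercalate [' ']
        (pvWfix k (List.splitOn ' ' cs).headI :: ((List.splitOn ' ' cs).tail.map (pvWfix 0))))
    ∧ (∀ k : Int, pvRA k true cs =
      List.intercalate [' ']
        ((List.splitOn ' ' cs).headI :: ((List.splitOn ' ' cs).tail.map (pvWfix 0)))) := by
  induction cs with
  | nil => exact ⟨fun k => by simp [pvRA, pvWfix, List.intercalate],
                 fun k => by simp [pvRA, List.intercalate]⟩
  | cons c cs ih =>
    obtain ⟨ih1, ih2⟩ := ih
    obtain ⟨w, ws, hsp⟩ : ∃ w ws, List.splitOn ' ' cs = w :: ws := by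
      rcases h : List.splitOn ' ' cs with _ | ⟨w, ws⟩
      · exact absurd (pvSplitOn_eq cs ▸ h) (List.splitOnP_ne_nil _ _)
      · exact ⟨w, ws, rfl⟩
    by_cases hs : c = ' '
    · have hsplit : List.splitOn ' ' (c :: cs) = [] :: w :: ws := by
        rw [pvSplitOn_eq, List.splitOnP_cons, if_pos (by simp [hs]), ← pvSplitOn_eq, hsp]
      constructor <;> intro k
      · rw [pvRA, if_neg (by simp [pvVK, hs]; decide), if_pos hs, ih1 0, hsplit]
        simp only [List.headI, List.tail, List.map, pvWfix, hsp]
        rw [show List.intercalate [' '] ([] :: pvWfix 0 w :: List.map (pvWfix 0) ws)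
             = [] ++ [' '] ++ List.intercalate [' '] (pvWfix 0 w :: List.map (pvWfix 0) ws) by
           simp [List.intercalate, List.intersperse]]
        simp [hs]
      · rw [pvRA, if_neg (by simp), if_pos hs, ih1 0, hsplit]
        simp only [List.headI, List.tail, List.map, hsp]
        rw [show List.intercalate [' '] ([] :: pvWfix 0 w :: List.map (pvWfix 0) ws)
             = [] ++ [' '] ++ List.intercalate [' '] (pvWfix 0 w :: List.map (pvWfix 0) ws) by
           simp [List.intercalate, List.intersperse]]
        simp [hs]
    · have hsplit : List.splitOn ' ' (c :: cs) = (c :: w) :: ws := by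
        rw [pvSplitOn_eq, List.splitOnP_cons, if_neg (by simp [hs]), ← pvSplitOn_eq, hsp]
        rfl
      constructor <;> intro k
      · by_cases hv : pvVK c = true
        · by_cases h2 : k + 1 = 2
          · rw [pvRA, if_pos (by simp [hv]), if_pos h2, ih2 (k+1), hsp, hsplit]
            simp only [List.headI, List.tail]
            rw [show pvWfix k (c :: w) = pvU c :: w by rw [pvWfix, if_pos hv, if_pos h2]]
            rw [pvIntercalate_cons_cons]
          · rw [pvRA, if_pos (by simp [hv]), if_neg h2, ih1 (k+1), hsp, hsplit]
            simp only [List.headI, List.tail]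
            rw [show pvWfix k (c :: w) = c :: pvWfix (k+1) w by rw [pvWfix, if_pos hv, if_neg h2]]
            rw [pvIntercalate_cons_cons]
        · rw [pvRA, if_neg (by simp [hv]), if_neg hs, ih1 k, hsp, hsplit]
          simp only [List.headI, List.tail]
          rw [show pvWfix k (c :: w) = c :: pvWfix k w by rw [pvWfix, if_neg hv]]
          rw [pvIntercalate_cons_cons]
      · rw [pvRA, if_neg (by simp), if_neg hs, ih2 k, hsp, hsplit]
        simp only [List.headI, List.tail]
        rw [pvIntercalate_cons_cons]

theorem pvFixB_eq : pvFixB = pvWfix 0 := by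
  funext w
  simpa [pvFixB] using pvFixGoB_spec w [] 0

-- ===== VERDICT (by name: the statement is the Claim_ definition above) =====
theorem translateToHeavyMetalTogether_spec : Claim_equal_translateToHeavyMetalTogether := by
  intro s _
  unfold Spec_translateToHeavyMetalTogether translateToHeavyMetalTogether translateToHeavyMetalTogether_alt
  rw [pvFoldA, pvFixB_eq]
  obtain ⟨w, ws, hsp⟩ : ∃ w ws, List.splitOn ' ' s.toList = w :: ws := by
    rcases h : List.splitOn ' ' s.toList with _ | ⟨w, ws⟩
    · exact absurd (pvSplitOn_eq s.toList ▸ h) (List.splitOnP_ne_nil _ _)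
    · exact ⟨w, ws, rfl⟩
  rw [(pvMain s.toList).1 0, hsp]
  simp [List.headI, List.tail]
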